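-- pv_equiv track=rewrite | github.com/calicorob/czapi | czapi/core/scraping/base.py | get_hammer_progressions
-- ===== SOURCE A (Python) =====
-- from typing import Optional, List, Any, Tuple
--
-- def get_hammer_progressions(hammer_start:bool,normalized_score:List[int])->Tuple[List[bool],List[bool]]:
--     current_hammer = hammer_start
--     current_score = 0
--     hammer_progression = [hammer_start]
--     for i in range(1,len(normalized_score)):
--         if current_hammer and (normalized_score[i] > current_score):
--             current_hammer = False
--         if not current_hammer and (normalized_score[i] < current_score):
--             current_hammer = True
--         current_score = normalized_score[i]
--         hammer_progression.append(current_hammer)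
--
--     return hammer_progression, list(map(lambda x: not x, hammer_progression))
-- ===== SOURCE B (Python) =====
-- from typing import List, Tuple
--
-- def _rle(s: List[int]) -> List[Tuple[int, int]]:
--     # run-length encode: maximal blocks of equal consecutive values
--     runs = []
--     i = 0
--     while i < len(s):
--         j = i + 1
--         while j < len(s) and s[j] == s[i]:
--             j += 1
--         runs.append((s[i], j - i))
--         i = j
--     return runs
--
-- def get_hammer_progressions(hammer_start: bool, normalized_score: List[int]) -> Tuple[List[bool], List[bool]]:
--     # Run-length encode the score sequence (seeded with the initial 0 score):
--     # the hammer state is constant within a run, the first run carries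
--     # hammer_start, and each later run's state is fixed by the direction of
--     # the step into it (decrease -> True, increase -> False).
--     runs = _rle([0] + normalized_score[1:])
--     prog = [hammer_start] * runs[0][1]
--     prev = runs[0][0]
--     for v, cnt in runs[1:]:
--         prog += [v < prev] * cnt
--         prev = v
--     return prog, [not x for x in prog]
-- ===== Notes on version B (the rewrite author's own statement) =====
-- stated objective: alternative
-- what changed: Replaces A's single elementwise loop with mutable hammer/score state by a run-length-encoding decomposition: the score sequence (seeded with 0) is compressed into (value,count) runs, and the progression is built by expanding each run into a constant block whose state is determined only by the step direction into the run.
import Mathlib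
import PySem

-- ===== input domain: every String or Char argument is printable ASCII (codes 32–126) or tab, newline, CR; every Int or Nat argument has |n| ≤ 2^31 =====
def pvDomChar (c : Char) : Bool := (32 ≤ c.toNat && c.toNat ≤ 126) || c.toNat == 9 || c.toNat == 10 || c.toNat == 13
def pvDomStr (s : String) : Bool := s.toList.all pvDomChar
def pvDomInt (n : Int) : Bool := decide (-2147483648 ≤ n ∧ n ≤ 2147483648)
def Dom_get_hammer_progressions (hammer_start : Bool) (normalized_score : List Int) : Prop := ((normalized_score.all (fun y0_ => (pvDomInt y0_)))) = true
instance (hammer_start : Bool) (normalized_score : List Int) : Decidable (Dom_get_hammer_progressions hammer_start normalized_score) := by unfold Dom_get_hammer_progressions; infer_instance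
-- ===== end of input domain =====

-- B replaces A's elementwise state loop by run-length encoding the score sequence and
-- expanding each run into a constant block; alternative structure, same cost.


-- ===== PORT A =====
-- state = (current_hammer, current_score, hammer_progression)
def pvStepA (acc : Bool × Int × List Bool) (v : Int) : Bool × Int × List Bool :=
  let ch := if acc.1 && decide (v > acc.2.1) then false else acc.1
  let ch := if !ch && decide (v < acc.2.1) then true else ch
  (ch, v, acc.2.2 ++ [ch])

def get_hammer_progressions (hammer_start : Bool) (normalized_score : List Int) : List Bool × List Bool :=
  -- for i in range(1, len(normalized_score)): … normalized_score[i] …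
  -- (index i is always in range, so pyGetD's default is never used)
  let st := (PySem.List.pyRange 1 normalized_score.length 1).foldl
    (fun acc i => pvStepA acc (PySem.List.pyGetD normalized_score i 0))
    (hammer_start, 0, [hammer_start])
  (st.2.2, st.2.2.map (fun x => !x))

-- ===== PORT B =====
-- _rle: each outer while-iteration consumes one maximal run of equal values
def pvRunLen (v : Int) : List Int → Nat
  | [] => 0
  | c :: t => if c = v then pvRunLen v t + 1 else 0

def pvRle : List Int → List (Int × Nat)
  | [] => []
  | v :: t => (v, pvRunLen v t + 1) :: pvRle (t.drop (pvRunLen v t))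
termination_by l => l.length
decreasing_by simp

-- loop body: prog += [v < prev] * cnt; prev = v
def pvStepB (acc : List Bool × Int) (vc : Int × Nat) : List Bool × Int :=
  (acc.1 ++ List.replicate vc.2 (decide (vc.1 < acc.2)), vc.1)

def get_hammer_progressions_alt (hammer_start : Bool) (normalized_score : List Int) : List Bool × List Bool :=
  let s := (0 : Int) :: PySem.List.slice normalized_score (some 1) none  -- [0] + normalized_score[1:]
  let runs := pvRle s
  let r0 := runs.headD (0, 0)            -- runs[0]; s is nonempty so runs is too
  let st := runs.tail.foldl pvStepB (List.replicate r0.2 hammer_start, r0.1)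
  (st.1, st.1.map (fun x => !x))

-- ===== PRECONDITION & SPEC =====
def Spec_get_hammer_progressions (hammer_start : Bool) (normalized_score : List Int) (out : List Bool × List Bool) : Prop := out = get_hammer_progressions_alt hammer_start normalized_score
instance (hammer_start : Bool) (normalized_score : List Int) (out : List Bool × List Bool) : Decidable (Spec_get_hammer_progressions hammer_start normalized_score out) := by unfold Spec_get_hammer_progressions; infer_instance

-- ===== CLAIM (what is proved, stated in full; the proofs are below) =====
def Claim_equal_get_hammer_progressions : Prop := ∀ (hammer_start : Bool) (normalized_score : List Int), Dom_get_hammer_progressions hammer_start normalized_score → Spec_get_hammer_progressions hammer_start normalized_score (get_hammer_progressions hammer_start normalized_score)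

-- ===== LEMMAS AND PROOFS =====

-- the mathematical recursion A's loop implements
def pvSpecRun (h : Bool) (p : Int) : List Int → List Bool
  | [] => []
  | c :: t =>
      let h' := if p < c then false else if c < p then true else h
      h' :: pvSpecRun h' c t

lemma pvStepA_eq (h : Bool) (p : Int) (hp : List Bool) (c : Int) :
    pvStepA (h, p, hp) c =
      ((if p < c then false else if c < p then true else h), c,
        hp ++ [if p < c then false else if c < p then true else h]) := by
  simp only [pvStepA]
  rcases lt_trichotomy p c with hlt | heq | hgt
  · simp [hlt, not_lt.mpr (le_of_lt hlt)]
  · subst heq; simp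
  · cases h <;> simp [hgt, not_lt.mpr (le_of_lt hgt)]

lemma pvFoldA (l : List Int) (h : Bool) (p : Int) (hp : List Bool) :
    (l.foldl pvStepA (h, p, hp)).2.2 = hp ++ pvSpecRun h p l := by
  induction l generalizing h p hp with
  | nil => simp [pvSpecRun]
  | cons c t ih =>
      simp only [List.foldl_cons, pvStepA_eq, pvSpecRun, ih, List.append_assoc,
        List.singleton_append]

lemma pvFoldA_range (ns : List Int) (k : Nat) (acc : Bool × Int × List Bool) :
    (PySem.List.pyRange k ns.length 1).foldl
      (fun acc i => pvStepA acc (PySem.List.pyGetD ns i 0)) acc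
    = (ns.drop k).foldl pvStepA acc := by
  by_cases hk : k < ns.length
  · rw [PySem.List.pyRange_one_cons (by exact_mod_cast hk)]
    have hdrop : ns.drop k = ns[k] :: ns.drop (k + 1) := by
      rw [List.drop_eq_getElem_cons hk]
    rw [List.foldl_cons, hdrop, List.foldl_cons]
    have hget : PySem.List.pyGetD ns (k : Int) 0 = ns[k] := by
      simp [PySem.List.pyGetD_natCast, List.getD_eq_getElem?_getD, List.getElem?_eq_getElem hk]
    rw [hget]
    have : ((k : Int) + 1) = ((k + 1 : Nat) : Int) := by push_cast; ring
    rw [this]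
    exact pvFoldA_range ns (k + 1) _
  · have h1 : PySem.List.pyRange (k : Int) ns.length 1 = [] := by
      simp [PySem.List.pyRange_of_pos (a := (k : Int)) (b := (ns.length : Int)) one_pos]
      omega
    have h2 : ns.drop k = [] := List.drop_eq_nil_of_le (by omega)
    rw [h1, h2]
    rfl
termination_by ns.length - k

-- the run length counts an equal prefix: the element after it (if any) differs
lemma pvRunLen_drop_head (t : List Int) (v c : Int)
    (h : (t.drop (pvRunLen v t)).head? = some c) : c ≠ v := by
  induction t with
  | nil => simp at h
  | cons a t ih =>
      by_cases hav : a = v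
      · simp only [pvRunLen, if_pos hav, List.drop_succ_cons] at h
        exact ih h
      · simp only [pvRunLen, if_neg hav, List.drop_zero, List.head?_cons,
          Option.some.injEq] at h
        exact h ▸ hav

-- within a run of equal scores the hammer state is unchanged
lemma pvSpecRun_const (t : List Int) (c : Int) (b : Bool) :
    pvSpecRun b c t =
      List.replicate (pvRunLen c t) b ++ pvSpecRun b c (t.drop (pvRunLen c t)) := by
  induction t with
  | nil => simp [pvRunLen]
  | cons a t ih =>
      by_cases hac : a = c
      · subst hac
        rw [pvSpecRun]
        simp only [lt_irrefl, if_false]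
        rw [ih]
        simp [pvRunLen, List.replicate_succ]
      · simp only [pvRunLen, if_neg hac, List.drop_zero, List.replicate_zero,
          List.nil_append]

-- the run-expansion fold computes the spec recursion (first value differing from p)
lemma pvFoldB (l : List Int) (p : Int) (h : Bool) (pre : List Bool)
    (hne : ∀ c, l.head? = some c → c ≠ p) :
    ((pvRle l).foldl pvStepB (pre, p)).1 = pre ++ pvSpecRun h p l := by
  induction l using pvRle.induct generalizing p h pre with
  | case1 => simp [pvRle, pvSpecRun]
  | case2 v t ih =>
      have hvp : v ≠ p := hne v rfl
      have hb : (if p < v then false else if v < p then true else h) = decide (v < p) := by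
        rcases lt_trichotomy p v with hlt | heq | hgt
        · simp [hlt, not_lt.mpr (le_of_lt hlt)]
        · exact absurd heq.symm hvp
        · simp [hgt, not_lt.mpr (le_of_lt hgt)]
      rw [pvRle, List.foldl_cons]
      have hstep : pvStepB (pre, p) (v, pvRunLen v t + 1)
          = (pre ++ List.replicate (pvRunLen v t + 1) (decide (v < p)), v) := rfl
      rw [hstep, ih v (decide (v < p)) (pre ++ List.replicate (pvRunLen v t + 1) (decide (v < p))) (fun c hc => pvRunLen_drop_head t v c hc)]
      rw [pvSpecRun]
      simp only [hb]
      rw [pvSpecRun_const t v (decide (v < p))]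
      simp [List.replicate_succ, List.append_assoc]

-- ===== VERDICT (by name: the statement is the Claim_ definition above) =====
theorem get_hammer_progressions_spec : Claim_equal_get_hammer_progressions := by
  intro hs ns _
  show get_hammer_progressions hs ns = get_hammer_progressions_alt hs ns
  simp only [get_hammer_progressions, get_hammer_progressions_alt,
    PySem.List.slice_from_one]
  have hA := pvFoldA_range ns 1 (hs, 0, [hs])
  simp only [Nat.cast_one] at hA
  rw [hA, pvFoldA (ns.drop 1) hs 0 [hs]]
  simp only [List.drop_one]
  set tl := ns.tail with htl
  set k := pvRunLen 0 tl with hk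
  have hrle : pvRle ((0 : Int) :: tl) = (0, k + 1) :: pvRle (tl.drop k) := by
    rw [pvRle]
  rw [hrle]
  simp only [List.headD_cons, List.tail_cons]
  rw [pvFoldB (tl.drop k) 0 hs (List.replicate (k + 1) hs)
      (fun c hc => pvRunLen_drop_head tl 0 c hc)]
  rw [pvSpecRun_const tl 0 hs, ← hk]
  simp [List.replicate_succ]
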